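-- pv_equiv track=rewrite | github.com/hkxxxxx/audioCraft_Plus_Enhanced | app_enhanced.py | calc_time
-- ===== SOURCE A (Python) =====
-- def s2t(seconds, seconds2):
--     # convert seconds to time format
--     # seconds - time in seconds
--     # return time in format 00:00
--     m, s = divmod(seconds, 60)
--     m2, s2 = divmod(seconds2, 60)
--     if seconds != 0 and seconds < seconds2:
--         s = s + 1
--     return ("%02d:%02d - %02d:%02d" % (m, s, m2, s2))
--
-- def calc_time(gen_type, s, duration, overlap, d0, d1, d2, d3, d4, d5, d6, d7, d8, d9):
--     # calculate the time of generation
--     # overlap - overlap in seconds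
--     # d0-d9 - drag
--     # return time in seconds
--     d_amount = [int(d0), int(d1), int(d2), int(d3), int(d4), int(d5), int(d6), int(d7), int(d8), int(d9)]
--     calc = []
--     tracks = []
--     time = 0
--     s = s - 1
--     max_time = duration
--     max_limit = 0
--     if gen_type == "music":
--         max_limit = 30
--     elif gen_type == "audio":
--         max_limit = 10
--     track_add = max_limit - overlap
--     tracks.append(max_limit + ((d_amount[0] - 1) * track_add))
--     for i in range(1, 10):
--         tracks.append(d_amount[i] * track_add)
--
--     if tracks[0] >= max_time or s == 0:
--         calc.append(s2t(time, max_time))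
--         time = max_time
--     else:
--         calc.append(s2t(time, tracks[0]))
--         time = tracks[0]
--
--     for i in range(1, 10):
--         if time + tracks[i] >= max_time or i == s:
--             calc.append(s2t(time, max_time))
--             time = max_time
--         else:
--             calc.append(s2t(time, time + tracks[i]))
--             time = time + tracks[i]
--
--     return calc[0], calc[1], calc[2], calc[3], calc[4], calc[5], calc[6], calc[7], calc[8], calc[9]
-- ===== SOURCE B (Python) =====
-- def s2t(seconds, seconds2):
--     # convert seconds to time format 00:00
--     m, s = divmod(seconds, 60)
--     m2, s2 = divmod(seconds2, 60)
--     if seconds != 0 and seconds < seconds2: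
--         s = s + 1
--     return ("%02d:%02d - %02d:%02d" % (m, s, m2, s2))
--
--
-- def calc_time(gen_type, s, duration, overlap, d0, d1, d2, d3, d4, d5, d6, d7, d8, d9):
--     drags = [int(d0), int(d1), int(d2), int(d3), int(d4),
--              int(d5), int(d6), int(d7), int(d8), int(d9)]
--     max_limit = {"music": 30, "audio": 10}.get(gen_type, 0)
--     step = max_limit - overlap
--
--     def track(i):
--         # length of track i, computed on demand (no tracks list)
--         if i == 0:
--             return max_limit + (drags[0] - 1) * step
--         return drags[i] * step
--
--     def emit(time, idxs):
--         # recursively format the remaining tracks starting at `time`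
--         if not idxs:
--             return ()
--         i, rest = idxs[0], idxs[1:]
--         nxt = time + track(i)
--         if nxt >= duration or i == s - 1:
--             return (s2t(time, duration),) + emit(duration, rest)
--         return (s2t(time, nxt),) + emit(nxt, rest)
--
--     return emit(0, list(range(10)))
-- ===== Notes on version B (the rewrite author's own statement) =====
-- stated objective: alternative
-- what changed: A's imperative two-phase loop (build a tracks list, then a special-cased first emission plus a range(1,10) append loop mutating calc/time) is replaced by a recursive formatter over the index list with the running time as an accumulator and track lengths computed on demand by a function (no tracks list, no calc list, no special first case); the unified condition is valid because at i=0 time is 0.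
import Mathlib
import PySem

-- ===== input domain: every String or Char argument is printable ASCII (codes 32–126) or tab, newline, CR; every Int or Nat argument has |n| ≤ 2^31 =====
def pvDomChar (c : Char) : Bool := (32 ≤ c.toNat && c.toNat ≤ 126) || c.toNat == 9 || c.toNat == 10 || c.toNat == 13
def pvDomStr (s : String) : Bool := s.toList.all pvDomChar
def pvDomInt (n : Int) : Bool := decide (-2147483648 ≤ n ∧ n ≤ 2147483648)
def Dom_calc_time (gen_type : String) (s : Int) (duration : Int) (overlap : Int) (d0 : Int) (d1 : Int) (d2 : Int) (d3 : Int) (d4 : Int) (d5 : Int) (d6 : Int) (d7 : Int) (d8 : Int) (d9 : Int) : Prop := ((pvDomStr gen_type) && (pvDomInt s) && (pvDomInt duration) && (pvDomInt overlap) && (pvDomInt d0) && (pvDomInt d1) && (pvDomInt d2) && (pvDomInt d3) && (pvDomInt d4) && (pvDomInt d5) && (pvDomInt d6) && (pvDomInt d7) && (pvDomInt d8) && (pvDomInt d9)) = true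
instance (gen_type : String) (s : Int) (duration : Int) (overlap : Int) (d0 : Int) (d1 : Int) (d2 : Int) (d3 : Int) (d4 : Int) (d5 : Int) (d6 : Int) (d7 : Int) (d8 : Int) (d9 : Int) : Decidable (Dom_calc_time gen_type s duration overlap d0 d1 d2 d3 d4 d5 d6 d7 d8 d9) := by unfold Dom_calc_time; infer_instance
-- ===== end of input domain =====

-- B replaces A's tracks-list + special-cased first emission + append loop by a single
-- recursive formatter with on-demand track lengths (objective: alternative, same cost).

-- ===== PORT A =====
-- "%02d" % n (zero-pad to width 2; negatives already ≥ 2 chars) — ported by hand, exact for all ints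
def pvPad2 (n : Int) : List Char :=
  let t := PySem.Int.toChars n
  if t.length ≥ 2 then t else '0' :: t

-- s2t helper (identical source in Source A and Source B, shared by both ports)
def s2t (seconds : Int) (seconds2 : Int) : String :=
  let m := PySem.Int.floordiv seconds 60
  let s := PySem.Int.mod seconds 60
  let m2 := PySem.Int.floordiv seconds2 60
  let s2 := PySem.Int.mod seconds2 60
  let s := if seconds ≠ 0 ∧ seconds < seconds2 then s + 1 else s
  String.ofList (pvPad2 m ++ [':'] ++ pvPad2 s ++ [' ', '-', ' '] ++ pvPad2 m2 ++ [':'] ++ pvPad2 s2)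

def calc_time (gen_type : String) (s : Int) (duration : Int) (overlap : Int) (d0 : Int) (d1 : Int) (d2 : Int) (d3 : Int) (d4 : Int) (d5 : Int) (d6 : Int) (d7 : Int) (d8 : Int) (d9 : Int) : String × String × String × String × String × String × String × String × String × String :=
  let d_amount : List Int := [d0, d1, d2, d3, d4, d5, d6, d7, d8, d9]
  let s := s - 1
  let max_time := duration
  let max_limit : Int := if gen_type = "music" then 30 else if gen_type = "audio" then 10 else 0
  let track_add := max_limit - overlap
  let tracks : List Int :=
    (PySem.List.pyRange 1 10 1).foldl
      (fun tr i => tr ++ [PySem.List.pyGetD d_amount i 0 * track_add])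
      [max_limit + (PySem.List.pyGetD d_amount 0 0 - 1) * track_add]
  let st0 : List String × Int :=
    if PySem.List.pyGetD tracks 0 0 ≥ max_time ∨ s = 0 then
      ([s2t 0 max_time], max_time)
    else
      ([s2t 0 (PySem.List.pyGetD tracks 0 0)], PySem.List.pyGetD tracks 0 0)
  let st :=
    (PySem.List.pyRange 1 10 1).foldl
      (fun (st : List String × Int) i =>
        if st.2 + PySem.List.pyGetD tracks i 0 ≥ max_time ∨ i = s then
          (st.1 ++ [s2t st.2 max_time], max_time)
        else
          (st.1 ++ [s2t st.2 (st.2 + PySem.List.pyGetD tracks i 0)], st.2 + PySem.List.pyGetD tracks i 0))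
      st0
  (PySem.List.pyGetD st.1 0 "", PySem.List.pyGetD st.1 1 "", PySem.List.pyGetD st.1 2 "",
   PySem.List.pyGetD st.1 3 "", PySem.List.pyGetD st.1 4 "", PySem.List.pyGetD st.1 5 "",
   PySem.List.pyGetD st.1 6 "", PySem.List.pyGetD st.1 7 "", PySem.List.pyGetD st.1 8 "",
   PySem.List.pyGetD st.1 9 "")

-- ===== PORT B =====
-- Source B's `track(i)`: length of track i, computed on demand
def pvTrackB (drags : List Int) (max_limit : Int) (step : Int) (i : Int) : Int :=
  if i = 0 then max_limit + (PySem.List.pyGetD drags 0 0 - 1) * step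
  else PySem.List.pyGetD drags i 0 * step

-- Source B's recursive `emit(time, idxs)`
def pvEmitB (track : Int → Int) (duration : Int) (sm1 : Int) : Int → List Int → List String
  | _, [] => []
  | time, i :: rest =>
    let nxt := time + track i
    if nxt ≥ duration ∨ i = sm1 then
      s2t time duration :: pvEmitB track duration sm1 duration rest
    else
      s2t time nxt :: pvEmitB track duration sm1 nxt rest

def calc_time_alt (gen_type : String) (s : Int) (duration : Int) (overlap : Int) (d0 : Int) (d1 : Int) (d2 : Int) (d3 : Int) (d4 : Int) (d5 : Int) (d6 : Int) (d7 : Int) (d8 : Int) (d9 : Int) : String × String × String × String × String × String × String × String × String × String :=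
  let drags : List Int := [d0, d1, d2, d3, d4, d5, d6, d7, d8, d9]
  let max_limit : Int := PySem.Dict.getD (PySem.Dict.ofList [("music", (30 : Int)), ("audio", 10)]) gen_type 0
  let step := max_limit - overlap
  let out := pvEmitB (pvTrackB drags max_limit step) duration (s - 1) 0 (PySem.List.pyRange 0 10 1)
  (PySem.List.pyGetD out 0 "", PySem.List.pyGetD out 1 "", PySem.List.pyGetD out 2 "",
   PySem.List.pyGetD out 3 "", PySem.List.pyGetD out 4 "", PySem.List.pyGetD out 5 "",
   PySem.List.pyGetD out 6 "", PySem.List.pyGetD out 7 "", PySem.List.pyGetD out 8 "",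
   PySem.List.pyGetD out 9 "")

-- ===== PRECONDITION & SPEC =====
def Spec_calc_time (gen_type : String) (s : Int) (duration : Int) (overlap : Int) (d0 : Int) (d1 : Int) (d2 : Int) (d3 : Int) (d4 : Int) (d5 : Int) (d6 : Int) (d7 : Int) (d8 : Int) (d9 : Int) (out : String × String × String × String × String × String × String × String × String × String) : Prop := out = calc_time_alt gen_type s duration overlap d0 d1 d2 d3 d4 d5 d6 d7 d8 d9
instance (gen_type : String) (s : Int) (duration : Int) (overlap : Int) (d0 : Int) (d1 : Int) (d2 : Int) (d3 : Int) (d4 : Int) (d5 : Int) (d6 : Int) (d7 : Int) (d8 : Int) (d9 : Int) (out : String × String × String × String × String × String × String × String × String × String) : Decidable (Spec_calc_time gen_type s duration overlap d0 d1 d2 d3 d4 d5 d6 d7 d8 d9 out) := by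
  unfold Spec_calc_time
  have h2 : DecidableEq (String × String) := instDecidableEqProd
  have h3 : DecidableEq (String × String × String) := @instDecidableEqProd _ _ _ h2
  have h4 : DecidableEq (String × String × String × String) := @instDecidableEqProd _ _ _ h3
  have h5 : DecidableEq (String × String × String × String × String) := @instDecidableEqProd _ _ _ h4
  have h6 : DecidableEq (String × String × String × String × String × String) := @instDecidableEqProd _ _ _ h5
  have h7 : DecidableEq (String × String × String × String × String × String × String) := @instDecidableEqProd _ _ _ h6
  have h8 : DecidableEq (String × String × String × String × String × String × String × String) := @instDecidableEqProd _ _ _ h7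
  have h9 : DecidableEq (String × String × String × String × String × String × String × String × String) := @instDecidableEqProd _ _ _ h8
  have h10 : DecidableEq (String × String × String × String × String × String × String × String × String × String) := @instDecidableEqProd _ _ _ h9
  exact h10 _ _

-- ===== CLAIM (what is proved, stated in full; the proofs are below) =====
def Claim_equal_calc_time : Prop := ∀ (gen_type : String) (s : Int) (duration : Int) (overlap : Int) (d0 : Int) (d1 : Int) (d2 : Int) (d3 : Int) (d4 : Int) (d5 : Int) (d6 : Int) (d7 : Int) (d8 : Int) (d9 : Int), Dom_calc_time gen_type s duration overlap d0 d1 d2 d3 d4 d5 d6 d7 d8 d9 → Spec_calc_time gen_type s duration overlap d0 d1 d2 d3 d4 d5 d6 d7 d8 d9 (calc_time gen_type s duration overlap d0 d1 d2 d3 d4 d5 d6 d7 d8 d9)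

-- ===== LEMMAS AND PROOFS =====
theorem pvRange110 : PySem.List.pyRange 1 10 1 = [1, 2, 3, 4, 5, 6, 7, 8, 9] := by decide
theorem pvRange010 : PySem.List.pyRange 0 10 1 = [0, 1, 2, 3, 4, 5, 6, 7, 8, 9] := by decide

-- the "music"/"audio" dict lookup in B equals A's if-chain
theorem pvDictLookup (g : String) :
    PySem.Dict.getD (PySem.Dict.ofList [("music", (30 : Int)), ("audio", 10)]) g 0
      = (if g = "music" then 30 else if g = "audio" then 10 else 0) := by
  simp only [PySem.Dict.ofList, PySem.Dict.update, List.foldl,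
    PySem.Dict.getD_insert, PySem.Dict.getD_empty]
  split_ifs <;> simp_all

-- A's emission fold over any index list equals acc ++ B's recursive emitter
theorem pvFoldEmit (tracks : List Int) (duration sm1 : Int) (idxs : List Int) :
    ∀ (acc : List String) (time : Int),
      (idxs.foldl (fun (st : List String × Int) i =>
          if st.2 + PySem.List.pyGetD tracks i 0 ≥ duration ∨ i = sm1 then
            (st.1 ++ [s2t st.2 duration], duration)
          else
            (st.1 ++ [s2t st.2 (st.2 + PySem.List.pyGetD tracks i 0)],
             st.2 + PySem.List.pyGetD tracks i 0))
        (acc, time)).1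
      = acc ++ pvEmitB (fun i => PySem.List.pyGetD tracks i 0) duration sm1 time idxs := by
  induction idxs with
  | nil => intro acc time; simp [pvEmitB]
  | cons i rest ih =>
    intro acc time
    by_cases h : time + PySem.List.pyGetD tracks i 0 ≥ duration ∨ i = sm1 <;>
      simp [pvEmitB, h, List.foldl_cons, ih]

-- B's emitter only looks at the track function on the indices it visits
theorem pvEmitB_congr (tr1 tr2 : Int → Int) (duration sm1 : Int) :
    ∀ (idxs : List Int) (time : Int), (∀ i ∈ idxs, tr1 i = tr2 i) →
      pvEmitB tr1 duration sm1 time idxs = pvEmitB tr2 duration sm1 time idxs := by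
  intro idxs
  induction idxs with
  | nil => intro time _; rfl
  | cons i rest ih =>
    intro time h
    have hi : tr1 i = tr2 i := h i (List.mem_cons_self ..)
    have hrest : ∀ j ∈ rest, tr1 j = tr2 j := fun j hj => h j (List.mem_cons_of_mem _ hj)
    simp only [pvEmitB, hi, ih _ hrest]

-- one unfolding step of B's emitter
theorem pvEmitB_cons (tr : Int → Int) (duration sm1 time i : Int) (rest : List Int) :
    pvEmitB tr duration sm1 time (i :: rest)
      = if time + tr i ≥ duration ∨ i = sm1 then
          s2t time duration :: pvEmitB tr duration sm1 duration rest
        else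
          s2t time (time + tr i) :: pvEmitB tr duration sm1 (time + tr i) rest := rfl

-- ===== VERDICT (by name: the statement is the Claim_ definition above) =====
theorem calc_time_spec : Claim_equal_calc_time := by
  intro gen_type s duration overlap d0 d1 d2 d3 d4 d5 d6 d7 d8 d9 _
  unfold Spec_calc_time calc_time calc_time_alt
  simp only [pvRange110, pvRange010, pvDictLookup]
  set ml : Int := if gen_type = "music" then 30 else if gen_type = "audio" then 10 else 0 with hml
  set ta : Int := ml - overlap with hta
  have htracks :
      ([1, 2, 3, 4, 5, 6, 7, 8, 9] : List Int).foldl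
        (fun tr i => tr ++ [PySem.List.pyGetD [d0, d1, d2, d3, d4, d5, d6, d7, d8, d9] i 0 * ta])
        [ml + (PySem.List.pyGetD [d0, d1, d2, d3, d4, d5, d6, d7, d8, d9] 0 0 - 1) * ta]
      = [ml + (d0 - 1) * ta, d1 * ta, d2 * ta, d3 * ta, d4 * ta,
         d5 * ta, d6 * ta, d7 * ta, d8 * ta, d9 * ta] := by
    simp [PySem.List.pyGetD, PySem.List.pyGet?, PySem.List.pyIdx?]
  rw [htracks]
  set L : List Int := [ml + (d0 - 1) * ta, d1 * ta, d2 * ta, d3 * ta, d4 * ta,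
      d5 * ta, d6 * ta, d7 * ta, d8 * ta, d9 * ta] with hL
  have hL0 : PySem.List.pyGetD L 0 0 = ml + (d0 - 1) * ta := by
    simp [hL, PySem.List.pyGetD, PySem.List.pyGet?, PySem.List.pyIdx?]
  have htr : ∀ i ∈ ([1, 2, 3, 4, 5, 6, 7, 8, 9] : List Int),
      PySem.List.pyGetD L i 0
        = pvTrackB [d0, d1, d2, d3, d4, d5, d6, d7, d8, d9] ml ta i := by
    intro i hi
    fin_cases hi <;>
      simp [hL, pvTrackB, PySem.List.pyGetD, PySem.List.pyGet?, PySem.List.pyIdx?]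
  have htr0 : pvTrackB [d0, d1, d2, d3, d4, d5, d6, d7, d8, d9] ml ta 0
      = ml + (d0 - 1) * ta := by
    simp [pvTrackB, PySem.List.pyGetD, PySem.List.pyGet?, PySem.List.pyIdx?]
  rw [pvFoldEmit L duration (s - 1) [1, 2, 3, 4, 5, 6, 7, 8, 9],
      pvEmitB_congr (fun i => PySem.List.pyGetD L i 0)
        (pvTrackB [d0, d1, d2, d3, d4, d5, d6, d7, d8, d9] ml ta)
        duration (s - 1) [1, 2, 3, 4, 5, 6, 7, 8, 9] _ htr,
      pvEmitB_cons (pvTrackB [d0, d1, d2, d3, d4, d5, d6, d7, d8, d9] ml ta)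
        duration (s - 1) 0 0 [1, 2, 3, 4, 5, 6, 7, 8, 9]]
  by_cases h0 : ml + (d0 - 1) * ta ≥ duration ∨ s - 1 = 0
  · have h0' : (0 : Int) + pvTrackB [d0, d1, d2, d3, d4, d5, d6, d7, d8, d9] ml ta 0 ≥ duration
        ∨ (0 : Int) = s - 1 := by
      rcases h0 with h | h
      · exact Or.inl (by rw [htr0]; omega)
      · exact Or.inr h.symm
    rw [hL0, if_pos h0, if_pos h0']
    rfl
  · have h0' : ¬ ((0 : Int) + pvTrackB [d0, d1, d2, d3, d4, d5, d6, d7, d8, d9] ml ta 0 ≥ duration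
        ∨ (0 : Int) = s - 1) := by
      rw [htr0]
      intro hc
      rcases hc with h | h
      · exact h0 (Or.inl (by omega))
      · exact h0 (Or.inr h.symm)
    rw [hL0, if_neg h0, if_neg h0', htr0]
    simp only [zero_add]
    rfl
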